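-- pv_equiv track=rewrite | github.com/brack3t/Djrill | djrill/mail/__init__.py | _set_mandrill_tags
-- ===== SOURCE A (Python) =====
-- def _set_mandrill_tags(tags):
--     """
--     Check that all tags are below 50 chars and that they do not start
--     with an underscore.
--
--     Raise ValueError if an underscore tag is passed in to
--     alert the user. Any tag over 50 chars is left out of the list.
--     """
--     tag_list = []
--
--     for tag in tags:
--         if len(tag) <= 50 and not tag.startswith("_"):
--             tag_list.append(tag)
--         elif tag.startswith("_"):
--             raise ValueError(
--                 "Tags starting with an underscore are reserved for "
--                 "internal use and will cause errors with Mandrill's API")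
--
--     return tag_list
-- ===== SOURCE B (Python) =====
-- def _set_mandrill_tags(tags):
--     """Validate then filter: whole-collection underscore check, then a
--     length-filter comprehension (same values and raise behaviour as A)."""
--     tags = list(tags)
--     if any(tag.startswith("_") for tag in tags):
--         raise ValueError(
--             "Tags starting with an underscore are reserved for "
--             "internal use and will cause errors with Mandrill's API")
--     return [tag for tag in tags if len(tag) <= 50]
-- ===== Notes on version B (the rewrite author's own statement) =====
-- stated objective: simpler
-- what changed: Replaces the single per-element branch loop (append/raise/skip) by a whole-collection underscore validation pass followed by a separate length-filter comprehension.
import Mathlib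
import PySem

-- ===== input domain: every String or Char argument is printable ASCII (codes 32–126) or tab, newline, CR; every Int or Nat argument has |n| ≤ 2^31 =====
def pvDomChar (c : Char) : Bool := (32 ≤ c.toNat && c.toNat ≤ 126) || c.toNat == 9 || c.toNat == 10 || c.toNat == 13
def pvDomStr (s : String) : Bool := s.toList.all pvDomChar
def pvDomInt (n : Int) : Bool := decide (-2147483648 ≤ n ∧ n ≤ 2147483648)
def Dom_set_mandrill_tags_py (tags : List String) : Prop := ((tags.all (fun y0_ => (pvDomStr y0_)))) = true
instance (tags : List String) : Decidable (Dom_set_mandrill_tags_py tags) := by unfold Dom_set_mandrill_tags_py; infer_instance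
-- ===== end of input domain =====

-- B validates the whole collection first, then filters by length; same values as A's
-- one-pass loop everywhere A returns (both raise ValueError on underscore tags).

-- ===== PORT A =====
-- A's loop: append if len ≤ 50 and no leading underscore; raise on leading underscore
-- (unreachable under Pre_; the raise branch yields [] here); otherwise skip.
def setMandrillTagsGoA (acc : List String) : List String → List String
  | [] => acc
  | t :: rest =>
    if PySem.Str.len t ≤ 50 ∧ ¬ (PySem.Str.startswith t "_" = true) then
      setMandrillTagsGoA (acc ++ [t]) rest
    else if PySem.Str.startswith t "_" = true then
      []  -- raise ValueError: excluded by Pre_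
    else
      setMandrillTagsGoA acc rest

def set_mandrill_tags_py (tags : List String) : List String :=
  setMandrillTagsGoA [] tags

-- ===== PORT B =====
def set_mandrill_tags_py_alt (tags : List String) : List String :=
  if tags.any (fun t => PySem.Str.startswith t "_") then
    []  -- raise ValueError: excluded by Pre_
  else
    tags.filter (fun t => PySem.Str.len t ≤ 50)

-- ===== PRECONDITION & SPEC =====
-- Pre_ excludes exactly the inputs on which A raises ValueError: a tag starting with '_'.
def Pre_set_mandrill_tags_py (tags : List String) : Prop :=
  ∀ t ∈ tags, ¬ (PySem.Str.startswith t "_" = true)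
instance (tags : List String) : Decidable (Pre_set_mandrill_tags_py tags) := by unfold Pre_set_mandrill_tags_py; infer_instance
def pvWitness_set_mandrill_tags_py : List String := (["alpha", "beta"])

def Spec_set_mandrill_tags_py (tags : List String) (out : List String) : Prop := out = set_mandrill_tags_py_alt tags
instance (tags : List String) (out : List String) : Decidable (Spec_set_mandrill_tags_py tags out) := by unfold Spec_set_mandrill_tags_py; infer_instance

-- ===== CLAIM (what is proved, stated in full; the proofs are below) =====
def Claim_equal_set_mandrill_tags_py : Prop := ∀ (tags : List String), Dom_set_mandrill_tags_py tags → Pre_set_mandrill_tags_py tags → Spec_set_mandrill_tags_py tags (set_mandrill_tags_py tags)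

-- ===== LEMMAS AND PROOFS =====
theorem setMandrillTagsGoA_eq (tags : List String)
    (h : ∀ t ∈ tags, ¬ (PySem.Str.startswith t "_" = true)) (acc : List String) :
    setMandrillTagsGoA acc tags = acc ++ tags.filter (fun t => PySem.Str.len t ≤ 50) := by
  induction tags generalizing acc with
  | nil => simp [setMandrillTagsGoA]
  | cons t rest ih =>
    have ht : PySem.Chars.startswith t.toList ['_'] = false := by
      simpa [PySem.Str.startswith] using h t (by simp)
    have hrest : ∀ x ∈ rest, ¬ (PySem.Str.startswith x "_" = true) := fun x hx => h x (by simp [hx])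
    by_cases hlen : t.length ≤ 50
    · simp [setMandrillTagsGoA, PySem.Str.len, PySem.Str.startswith, hlen, ht, ih hrest,
        List.filter_cons]
    · simp [setMandrillTagsGoA, PySem.Str.len, PySem.Str.startswith, hlen, ht, ih hrest,
        List.filter_cons]

-- ===== VERDICT (by name: the statement is the Claim_ definition above) =====
theorem set_mandrill_tags_py_spec : Claim_equal_set_mandrill_tags_py := by
  intro tags _ hpre
  unfold Spec_set_mandrill_tags_py set_mandrill_tags_py set_mandrill_tags_py_alt
  have hany : tags.any (fun t => PySem.Str.startswith t "_") = false := by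
    simp only [List.any_eq_false]
    exact hpre
  rw [hany, setMandrillTagsGoA_eq tags hpre []]
  simp
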